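-- pv_equiv track=rewrite | github.com/daniel880423/Member_System | file/hw2/1093739/s1093739_0.py | homework_2
-- ===== SOURCE A (Python) =====
-- def homework_2(lst): # 請同學記得把檔案名稱改成自己的學號(ex.1104813.py)
--     step_count = 0
--     index = 1
--     for i in range(0,len(lst)):
--         if index == len(lst):
--             break
--         else:
--             while lst[index] <= lst[i]:
--                 lst[index] += 1
--                 step_count += 1
--                 if lst[index] < lst[i]:
--                     lst[index] += 1
--                     step_count += 1
--                 else:
--                     if (lst[index] % 2 != 0 ):
--                         lst[index] += 1
--                         step_count += 1
--
--
--                     if lst[index] == lst[i]: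
--                         lst[index] += 1
--                         step_count += 1
--
--
--                     if lst[i] % 2 != 0:
--                         lst[i] += 1
--                         step_count += 1
--
--
--                     #lst[index] += 1
--
--                 continue
--
--
--             if lst[index] % 2 != 0:
--                 lst[index] += 1
--                 step_count += 1
--             if lst[i] %2 != 0:
--                 lst[i] += 1
--                 step_count += 1
--
--
--             index += 1
--
--
--
--     return (step_count)
-- ===== SOURCE B (Python) =====
-- def homework_2(lst):  # closed-form per adjacent pair; does not mutate lst (A does; return value equal)
--     if not lst:
--         return 0
--     steps = 0
--     a = lst[0]
--     for b in lst[1:]: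
--         pa = a & 1
--         if b <= a:
--             bp = a + pa + 2
--         else:
--             bp = b + (b & 1)
--         steps += (bp - b) + pa
--         a = bp
--     return steps
-- ===== Notes on version B (the rewrite author's own statement) =====
-- stated objective: faster
-- what changed: B replaces A's inner while loop, which increments lst[index] one step at a time until it passes lst[i], by a closed-form arithmetic step count per adjacent pair, folding once over the list; B also does not mutate the input list (A does).
import Mathlib
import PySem

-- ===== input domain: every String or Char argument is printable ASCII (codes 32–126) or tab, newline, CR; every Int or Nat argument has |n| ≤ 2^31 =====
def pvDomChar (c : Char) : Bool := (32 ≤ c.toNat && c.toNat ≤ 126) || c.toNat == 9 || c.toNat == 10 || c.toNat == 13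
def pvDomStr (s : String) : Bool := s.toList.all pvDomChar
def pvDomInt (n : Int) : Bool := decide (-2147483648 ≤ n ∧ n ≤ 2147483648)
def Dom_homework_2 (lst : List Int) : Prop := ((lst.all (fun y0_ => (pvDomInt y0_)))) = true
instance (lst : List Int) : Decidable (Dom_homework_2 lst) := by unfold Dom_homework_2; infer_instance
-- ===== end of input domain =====

-- B replaces A's magnitude-proportional inner while loop by a closed-form step count per
-- adjacent pair (faster in a timing run); A mutates its argument, B does not — the
-- equivalence proved here is about the return value only.


-- ===== PORT A =====
-- Python's inner `while lst[index] <= lst[i]` touches only the two cells lst[i], lst[index];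
-- it is ported as a recursion on those two values (a, b) plus the step counter c, statement
-- for statement in A's order.  `fuel` is only a structural totality guard: each loop
-- iteration strictly decreases 2*(a+2-b) + (1 if a is odd), so the fuel passed by pvWhileA
-- below never runs out.  Returns (lst[i], lst[index], step_count).
def pvWhileAF : Nat → Int → Int → Int → Int × Int × Int
  | 0, a, b, c => (a, b, c)  -- never reached with the fuel pvWhileA supplies
  | fuel + 1, a, b, c =>
    if b ≤ a then
      -- lst[index] += 1; step_count += 1
      let b' := b + 1
      let c' := c + 1
      if b' < a then
        -- lst[index] += 1; step_count += 1
        pvWhileAF fuel a (b' + 1) (c' + 1)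
      else
        -- if lst[index] % 2 != 0: lst[index] += 1; step_count += 1
        let b2 := if b' % 2 ≠ 0 then b' + 1 else b'
        let c2 := if b' % 2 ≠ 0 then c' + 1 else c'
        -- if lst[index] == lst[i]: lst[index] += 1; step_count += 1
        let b3 := if b2 = a then b2 + 1 else b2
        let c3 := if b2 = a then c2 + 1 else c2
        -- if lst[i] % 2 != 0: lst[i] += 1; step_count += 1
        let a2 := if a % 2 ≠ 0 then a + 1 else a
        let c4 := if a % 2 ≠ 0 then c3 + 1 else c3
        pvWhileAF fuel a2 b3 c4
    else (a, b, c)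

def pvWhileA (a b c : Int) : Int × Int × Int :=
  pvWhileAF ((2 * (a + 2 - b)).toNat + 2) a b c

-- the `for i in range(0, len(lst))` loop: state = the (mutated) list, index, step_count;
-- `rem` = n - i, the number of loop iterations left (known upfront from range), structurally
def pvForA (lst : List Int) (n : Nat) : Nat → Nat → Nat → Int → Int
  | 0, _, _, c => c
  | rem + 1, i, index, c =>
    if index = n then c
    else
      let a := (lst.getD i 0)
      let b := (lst.getD index 0)
      let r := pvWhileA a b c
      -- if lst[index] % 2 != 0: lst[index] += 1; step_count += 1
      let b1 := if r.2.1 % 2 ≠ 0 then r.2.1 + 1 else r.2.1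
      let c1 := if r.2.1 % 2 ≠ 0 then r.2.2 + 1 else r.2.2
      -- if lst[i] % 2 != 0: lst[i] += 1; step_count += 1
      let a1 := if r.1 % 2 ≠ 0 then r.1 + 1 else r.1
      let c2 := if r.1 % 2 ≠ 0 then c1 + 1 else c1
      pvForA ((lst.set i a1).set index b1) n rem (i + 1) (index + 1) c2

def homework_2 (lst : List Int) : Int := pvForA lst lst.length lst.length 0 1 0

-- ===== PORT B =====
-- fold over the tail with a closed-form cost per adjacent pair (Source B's loop)
def pvFoldB (a : Int) (rest : List Int) (steps : Int) : Int :=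
  match rest with
  | [] => steps
  | b :: bs =>
    let pa := if a % 2 ≠ 0 then (1 : Int) else 0
    let bp := if b ≤ a then a + pa + 2 else b + (if b % 2 ≠ 0 then 1 else 0)
    pvFoldB bp bs (steps + (bp - b) + pa)

def homework_2_alt (lst : List Int) : Int :=
  match lst with
  | [] => 0
  | a :: rest => pvFoldB a rest 0

-- ===== PRECONDITION & SPEC =====
def Spec_homework_2 (lst : List Int) (out : Int) : Prop := out = homework_2_alt lst
instance (lst : List Int) (out : Int) : Decidable (Spec_homework_2 lst out) := by unfold Spec_homework_2; infer_instance

-- ===== CLAIM (what is proved, stated in full; the proofs are below) =====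
def Claim_equal_homework_2 : Prop := ∀ (lst : List Int), Dom_homework_2 lst → Spec_homework_2 lst (homework_2 lst)

-- ===== LEMMAS AND PROOFS =====

-- closed forms for one pair: B's bp and cost
def pvBp (a b : Int) : Int :=
  if b ≤ a then a + (if a % 2 ≠ 0 then 1 else 0) + 2
  else b + (if b % 2 ≠ 0 then 1 else 0)

def pvCost (a b : Int) : Int := (pvBp a b - b) + (if a % 2 ≠ 0 then 1 else 0)

-- the while loop followed by the two post-loop `if`s equals the closed form
theorem pair_spec_aux : ∀ (fuel : ℕ) (a b c : Int),
    (2 * (a + 2 - b)).toNat + (if a % 2 ≠ 0 then 1 else 0) < fuel →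
    (let r := pvWhileAF fuel a b c
     ((if r.2.1 % 2 ≠ 0 then r.2.1 + 1 else r.2.1),
      (if r.1 % 2 ≠ 0 then (if r.2.1 % 2 ≠ 0 then r.2.2 + 1 else r.2.2) + 1
       else (if r.2.1 % 2 ≠ 0 then r.2.2 + 1 else r.2.2))))
    = (pvBp a b, c + pvCost a b) := by
  intro fuel
  induction fuel with
  | zero =>
      intro a b c hn
      exact absurd hn (Nat.not_lt_zero _)
  | succ n ih =>
      intro a b c hn
      rw [pvWhileAF]
      by_cases hba : b ≤ a
      · simp only [if_pos hba]
        by_cases hlt : b + 1 < a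
        · simp only [if_pos hlt]
          rw [ih a (b + 1 + 1) (c + 1 + 1) (by split_ifs at hn ⊢ <;> omega)]
          simp only [pvBp, pvCost]
          split_ifs <;> (simp only [Prod.mk.injEq, true_and]; first | trivial | omega)
        · simp only [if_neg hlt]
          rw [ih _ _ _ (by split_ifs at hn ⊢ <;> omega)]
          simp only [pvBp, pvCost]
          split_ifs <;> (simp only [Prod.mk.injEq, true_and]; first | trivial | omega)
      · simp only [if_neg hba, pvBp, pvCost]
        split_ifs <;> (simp only [Prod.mk.injEq, true_and]; first | trivial | omega)

theorem pair_spec (a b c : Int) :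
    (let r := pvWhileA a b c
     ((if r.2.1 % 2 ≠ 0 then r.2.1 + 1 else r.2.1),
      (if r.1 % 2 ≠ 0 then (if r.2.1 % 2 ≠ 0 then r.2.2 + 1 else r.2.2) + 1
       else (if r.2.1 % 2 ≠ 0 then r.2.2 + 1 else r.2.2))))
    = (pvBp a b, c + pvCost a b) :=
  pair_spec_aux _ a b c (by split_ifs <;> omega)

theorem forA_fold (rest : List Int) : ∀ (pre : List Int) (a c : Int),
    pvForA (pre ++ a :: rest) (pre.length + (a :: rest).length) (a :: rest).length
        pre.length (pre.length + 1) c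
      = pvFoldB a rest c := by
  induction rest with
  | nil =>
      intro pre a c
      simp [pvForA, pvFoldB]
  | cons b bs ih =>
      intro pre a c
      rw [show ((a : Int) :: b :: bs).length = (b :: bs).length + 1 from rfl]
      simp only [pvForA]
      have hga : (pre ++ a :: b :: bs).getD pre.length 0 = a := by
        simp [List.getD_eq_getElem?_getD]
      have hgb : (pre ++ a :: b :: bs).getD (pre.length + 1) 0 = b := by
        rw [List.getD_eq_getElem?_getD, List.getElem?_append_right (by omega)]
        simp
      rw [hga, hgb]
      have hp := pair_spec a b c
      simp only at hp
      have hb1 : (if (pvWhileA a b c).2.1 % 2 ≠ 0 then (pvWhileA a b c).2.1 + 1 else (pvWhileA a b c).2.1) = pvBp a b := congrArg Prod.fst hp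
      have hc2 : (if (pvWhileA a b c).1 % 2 ≠ 0 then
            (if (pvWhileA a b c).2.1 % 2 ≠ 0 then (pvWhileA a b c).2.2 + 1 else (pvWhileA a b c).2.2) + 1
          else (if (pvWhileA a b c).2.1 % 2 ≠ 0 then (pvWhileA a b c).2.2 + 1 else (pvWhileA a b c).2.2)) = c + pvCost a b := congrArg Prod.snd hp
      rw [hb1, hc2]
      have hset : (((pre ++ a :: b :: bs).set pre.length
            (if (pvWhileA a b c).1 % 2 ≠ 0 then (pvWhileA a b c).1 + 1 else (pvWhileA a b c).1)).set
            (pre.length + 1) (pvBp a b))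
          = (pre ++ [if (pvWhileA a b c).1 % 2 ≠ 0 then (pvWhileA a b c).1 + 1 else (pvWhileA a b c).1]) ++ pvBp a b :: bs := by
        rw [List.set_append_right _ _ (by omega), List.set_append_right _ _ (by omega)]
        simp
      rw [hset]
      have hx : pvFoldB a (b :: bs) c = pvFoldB (pvBp a b) bs (c + pvCost a b) := by
        rw [pvFoldB]
        have h1 : (if b ≤ a then a + (if a % 2 ≠ 0 then (1:Int) else 0) + 2
              else b + (if b % 2 ≠ 0 then (1:Int) else 0)) = pvBp a b := by
          simp only [pvBp]
        rw [h1]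
        have h2 : c + (pvBp a b - b) + (if a % 2 ≠ 0 then (1:Int) else 0) = c + pvCost a b := by
          simp only [pvCost]; ring
        rw [h2]
      rw [hx]
      have h3 := ih (pre ++ [if (pvWhileA a b c).1 % 2 ≠ 0 then (pvWhileA a b c).1 + 1 else (pvWhileA a b c).1])
        (pvBp a b) (c + pvCost a b)
      simp only [List.length_append, List.length_cons, List.length_nil, Nat.zero_add] at h3 ⊢
      rw [show pre.length + (bs.length + 1 + 1) = pre.length + 1 + (bs.length + 1) by omega,
          if_neg (show ¬ (pre.length + 1 = pre.length + 1 + (bs.length + 1)) by omega)]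
      exact h3

-- ===== VERDICT (by name: the statement is the Claim_ definition above) =====
theorem homework_2_spec : Claim_equal_homework_2 := by
  intro lst _
  unfold Spec_homework_2 homework_2 homework_2_alt
  match lst with
  | [] => simp [pvForA]
  | a :: rest =>
      have := forA_fold rest [] a 0
      simpa using this
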